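-- pv_equiv track=rewrite | github.com/askanna-io/askanna-backend | apps/core/utils/utils.py | get_all_directories
-- ===== SOURCE A (Python) =====
-- def get_all_directories(paths: list) -> list[str]:
--     """
--     Get a list of all directories from a list of paths. By unwinding the paths we make sure that all (sub)directories
--     are available in the list of directories we return.
--     """
--
--     directories = []
--     for path in paths:
--         directories.append(path)
--
--         path_parts = path.split("/")
--         while len(path_parts) > 1:
--             path_parts = path_parts[: len(path_parts) - 1]
--             path = "/".join(path_parts)
--             if path and path != "/":
--                 directories.append(path)
--
--     return sorted(list(set(directories) - {"/"} - {""}))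
-- ===== SOURCE B (Python) =====
-- def get_all_directories(paths: list) -> list[str]:
--     """Forward prefix scan: split each path once and accumulate prefixes front-to-back
--     into a set; the last accumulated prefix is the full path itself."""
--     dirs = set()
--     for path in paths:
--         acc = None
--         for part in path.split("/"):
--             acc = part if acc is None else acc + "/" + part
--             dirs.add(acc)
--     return sorted(dirs - {"/", ""})
-- ===== Notes on version B (the rewrite author's own statement) =====
-- stated objective: alternative
-- what changed: Replaces A's backward suffix-trim-and-rejoin per path (slice off the last part, re-join, repeat) with a single forward scan over the split parts that accumulates a growing prefix string into a set, the full path arising as the last accumulation.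
import Mathlib
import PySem

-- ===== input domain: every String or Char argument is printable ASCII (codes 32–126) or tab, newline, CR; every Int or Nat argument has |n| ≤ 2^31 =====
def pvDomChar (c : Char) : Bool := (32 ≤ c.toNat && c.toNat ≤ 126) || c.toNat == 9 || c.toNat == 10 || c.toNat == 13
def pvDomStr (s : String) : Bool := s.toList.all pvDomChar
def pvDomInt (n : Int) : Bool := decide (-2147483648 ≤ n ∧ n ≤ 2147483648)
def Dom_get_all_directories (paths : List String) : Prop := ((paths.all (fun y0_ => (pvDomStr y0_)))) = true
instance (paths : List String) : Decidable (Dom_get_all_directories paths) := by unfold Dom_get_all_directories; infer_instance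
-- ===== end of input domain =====

-- B replaces A's backward suffix-trim-and-rejoin per path with a forward prefix
-- accumulation over the split parts into a set (objective: alternative decomposition).

-- ===== PORT A =====
-- A's inner while loop: repeatedly slice off the last component and re-join.
-- path_parts[: len(path_parts) - 1] is exactly List.take (len - 1) since len - 1 ≥ 1 here.
def pvAWhile (path_parts : List String) (directories : List String) : List String :=
  if 1 < path_parts.length then
    let pp := path_parts.take (path_parts.length - 1)
    let path := PySem.Str.join "/" pp
    pvAWhile pp (if path ≠ "" ∧ path ≠ "/" then directories ++ [path] else directories)
  else directories
termination_by path_parts.length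
decreasing_by simp; omega

def get_all_directories (paths : List String) : List String :=
  let directories := paths.foldl (fun directories path =>
    -- path.split("/"): split? is `some` since the separator "/" is non-empty
    pvAWhile ((PySem.Str.split? path "/").getD []) (directories ++ [path])) []
  -- sorted(list(set(directories) - {"/"} - {""})): set difference = drop "/" and ""
  PySem.List.sorted (List.filter (fun s => !(s == "/" || s == "")) (PySem.Set.ofList directories)) (fun x => x)

-- ===== PORT B =====
-- Python str concatenation a + b (exact)
def pvStrCat (a b : String) : String := String.ofList (a.toList ++ b.toList)

-- B's inner for loop: acc = part if acc is None else acc + "/" + part; dirs.add(acc)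
def pvAccParts : List String → Option String → PySem.Set String → PySem.Set String
  | [], _, dirs => dirs
  | part :: rest, acc?, dirs =>
    let acc := match acc? with
      | none => part
      | some a => pvStrCat (pvStrCat a "/") part
    pvAccParts rest (some acc) (PySem.Set.add dirs acc)

def get_all_directories_alt (paths : List String) : List String :=
  let dirs := paths.foldl (fun dirs path =>
    pvAccParts ((PySem.Str.split? path "/").getD []) none dirs) (PySem.Set.ofList [])
  -- sorted(dirs - {"/", ""})
  PySem.List.sorted (List.filter (fun s => !(s == "/" || s == "")) dirs) (fun x => x)

-- ===== PRECONDITION & SPEC =====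
def Spec_get_all_directories (paths : List String) (out : List String) : Prop := out = get_all_directories_alt paths
instance (paths : List String) (out : List String) : Decidable (Spec_get_all_directories paths out) := by unfold Spec_get_all_directories; infer_instance

-- ===== CLAIM (what is proved, stated in full; the proofs are below) =====
def Claim_equal_get_all_directories : Prop := ∀ (paths : List String), Dom_get_all_directories paths → Spec_get_all_directories paths (get_all_directories paths)

-- ===== LEMMAS AND PROOFS =====

theorem pv_join_snoc (ys : List (List Char)) (z : List Char) :
    PySem.Chars.join ['/'] (ys ++ [z])
      = PySem.Chars.join ['/'] ys ++ (if ys.isEmpty then [] else ['/']) ++ z := by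
  induction ys with
  | nil => simp [PySem.Chars.join_nil, PySem.Chars.join_singleton]
  | cons a ys ih =>
    cases ys with
    | nil => simp [PySem.Chars.join_cons_cons, PySem.Chars.join_singleton]
    | cons b ys' =>
      simp only [List.cons_append] at ih ⊢
      rw [PySem.Chars.join_cons_cons, ih, PySem.Chars.join_cons_cons]
      simp

theorem pv_join_go (fuel : Nat) (l cur : List Char) (acc : List (List Char)) :
    PySem.Chars.join ['/'] (PySem.Chars.splitOn.go ['/'] fuel l cur acc)
      = PySem.Chars.join ['/'] acc.reverse ++ (if acc.isEmpty then [] else ['/'])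
          ++ cur.reverse ++ l := by
  induction fuel generalizing l cur acc with
  | zero =>
    simp only [PySem.Chars.splitOn.go, List.reverse_cons, pv_join_snoc]
    simp [List.append_assoc]
  | succ fuel ih =>
    cases l with
    | nil =>
      simp only [PySem.Chars.splitOn.go, List.reverse_cons, pv_join_snoc]
      simp
    | cons c rest =>
      simp only [PySem.Chars.splitOn.go]
      by_cases hc : c = '/'
      · subst hc
        rw [if_pos (by simp [List.isPrefixOf])]
        rw [ih]
        simp [pv_join_snoc, List.append_assoc]
      · rw [if_neg (by simp [List.isPrefixOf, Ne.symm hc])]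
        rw [ih]
        simp [List.append_assoc]

theorem pv_join_split (s : String) :
    PySem.Str.join "/" ((PySem.Str.split? s "/").getD []) = s := by
  have hsep : "/".toList = ['/'] := by decide
  rw [PySem.Str.split?, hsep, PySem.Chars.split?]
  norm_num
  rw [String.ext_iff, PySem.Str.toList_join, hsep, List.map_map]
  have hmaps : (List.map (String.toList ∘ String.ofList) (PySem.Chars.splitOn s.toList ['/'])) = PySem.Chars.splitOn s.toList ['/'] := by
    simp [Function.comp_def]
  rw [hmaps, PySem.Chars.splitOn, pv_join_go]
  simp [PySem.Chars.join_nil]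

theorem pv_join_one (p : String) : PySem.Str.join "/" [p] = p := by
  rw [String.ext_iff, PySem.Str.toList_join]
  simp [PySem.Chars.join_singleton]

theorem pv_join_cons (p : String) (ps : List String) (h : ps ≠ []) :
    PySem.Str.join "/" (p :: ps) = pvStrCat (pvStrCat p "/") (PySem.Str.join "/" ps) := by
  cases ps with
  | nil => exact absurd rfl h
  | cons q rest =>
    rw [String.ext_iff]
    simp only [pvStrCat, PySem.Str.toList_join, List.map_cons, PySem.Chars.join_cons_cons]
    have hsep : "/".toList = ['/'] := by decide
    simp [hsep]

theorem pv_shift (a part : String) (ps : List String) (h : ps ≠ []) :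
    pvStrCat (pvStrCat (pvStrCat (pvStrCat a "/") part) "/") (PySem.Str.join "/" ps)
      = pvStrCat (pvStrCat a "/") (PySem.Str.join "/" (part :: ps)) := by
  rw [pv_join_cons part ps h, String.ext_iff]
  simp [pvStrCat]

theorem pv_take_ne_nil (k : Nat) (rest : List String) (hk1 : 1 ≤ k) (hk2 : k ≤ rest.length) :
    List.take k rest ≠ [] := by
  have : (List.take k rest).length = min k rest.length := List.length_take
  intro hnil
  rw [hnil] at this
  simp at this
  omega

theorem pv_A1 (parts dirs : List String) (x : String) :
    x ∈ pvAWhile parts dirs ↔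
      x ∈ dirs ∨ ∃ k, 1 ≤ k ∧ k < parts.length ∧
        x = PySem.Str.join "/" (parts.take k) ∧ x ≠ "" ∧ x ≠ "/" := by
  induction parts, dirs using pvAWhile.induct with
  | case1 parts dirs h pp path ih =>
    rw [pvAWhile, if_pos h]
    have ih' := ih
    simp only [dite_eq_ite] at ih'
    refine Iff.trans ih' ?_
    have hlen : pp.length = parts.length - 1 := by
      show (List.take (parts.length - 1) parts).length = parts.length - 1
      simp
    have htk : ∀ k, k ≤ parts.length - 1 → List.take k pp = List.take k parts := by
      intro k hk
      show List.take k (List.take (parts.length - 1) parts) = List.take k parts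
      rw [List.take_take]
      congr 1
      omega
    constructor
    · rintro (hx | ⟨k, hk1, hk2, hx, hne1, hne2⟩)
      · by_cases hc : path ≠ "" ∧ path ≠ "/"
        · rw [if_pos hc] at hx
          rcases List.mem_append.mp hx with h1 | h2
          · exact Or.inl h1
          · right
            have hxp : x = path := by simpa using h2
            exact ⟨parts.length - 1, by omega, by omega, hxp, by rw [hxp]; exact hc.1, by rw [hxp]; exact hc.2⟩
        · rw [if_neg hc] at hx
          exact Or.inl hx
      · right
        refine ⟨k, hk1, by omega, ?_, hne1, hne2⟩
        rw [hx, htk k (by omega)]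
    · rintro (hx | ⟨k, hk1, hk2, hx, hne1, hne2⟩)
      · left
        split_ifs with hc
        · exact List.mem_append_left _ hx
        · exact hx
      · by_cases hk : k = parts.length - 1
        · left
          have hxp : x = path := by rw [hx, hk]
          rw [if_pos (by rw [← hxp]; exact ⟨hne1, hne2⟩)]
          exact List.mem_append_right _ (by simp [hxp])
        · right
          refine ⟨k, hk1, by omega, ?_, hne1, hne2⟩
          rw [hx, htk k (by omega)]
  | case2 parts dirs h =>
    rw [pvAWhile, if_neg h]
    constructor
    · exact Or.inl
    · rintro (hx | ⟨k, hk1, hk2, _⟩)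
      · exact hx
      · omega

theorem pv_B1aux (parts : List String) (a : String) (dirs : PySem.Set String) (x : String) :
    x ∈ pvAccParts parts (some a) dirs ↔
      x ∈ dirs ∨ ∃ k, 1 ≤ k ∧ k ≤ parts.length ∧
        x = pvStrCat (pvStrCat a "/") (PySem.Str.join "/" (parts.take k)) := by
  induction parts generalizing a dirs with
  | nil =>
    simp only [pvAccParts, List.length_nil]
    constructor
    · exact Or.inl
    · rintro (hx | ⟨k, hk1, hk2, _⟩)
      · exact hx
      · omega
  | cons part rest ih =>
    simp only [pvAccParts]
    rw [ih, PySem.Set.mem_add]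
    constructor
    · rintro ((hx | hx) | ⟨k, hk1, hk2, hx⟩)
      · exact Or.inl hx
      · right
        refine ⟨1, le_refl 1, by simp, ?_⟩
        rw [List.take_succ_cons, List.take_zero, pv_join_one]
        exact hx
      · right
        refine ⟨k + 1, by omega, by simp; omega, ?_⟩
        rw [List.take_succ_cons, ← pv_shift a part _ (pv_take_ne_nil k rest hk1 hk2)]
        exact hx
    · rintro (hx | ⟨k, hk1, hk2, hx⟩)
      · exact Or.inl (Or.inl hx)
      · rcases k with _ | (_ | k')
        · omega
        · left; right
          rw [List.take_succ_cons, List.take_zero, pv_join_one] at hx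
          exact hx
        · right
          refine ⟨k' + 1, by omega, by simp at hk2; omega, ?_⟩
          rw [List.take_succ_cons, ← pv_shift a part _ (pv_take_ne_nil (k' + 1) rest (by omega) (by simp at hk2; omega))] at hx
          exact hx

theorem pv_B1 (parts : List String) (dirs : PySem.Set String) (x : String) :
    x ∈ pvAccParts parts none dirs ↔
      x ∈ dirs ∨ ∃ k, 1 ≤ k ∧ k ≤ parts.length ∧ x = PySem.Str.join "/" (parts.take k) := by
  cases parts with
  | nil =>
    simp only [pvAccParts, List.length_nil]
    constructor
    · exact Or.inl
    · rintro (hx | ⟨k, hk1, hk2, _⟩)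
      · exact hx
      · omega
  | cons part rest =>
    simp only [pvAccParts]
    rw [pv_B1aux, PySem.Set.mem_add]
    constructor
    · rintro ((hx | hx) | ⟨k, hk1, hk2, hx⟩)
      · exact Or.inl hx
      · right
        refine ⟨1, le_refl 1, by simp, ?_⟩
        rw [List.take_succ_cons, List.take_zero, pv_join_one]
        exact hx
      · right
        refine ⟨k + 1, by omega, by simp; omega, ?_⟩
        rw [List.take_succ_cons, pv_join_cons part _ (pv_take_ne_nil k rest hk1 hk2)]
        exact hx
    · rintro (hx | ⟨k, hk1, hk2, hx⟩)
      · exact Or.inl (Or.inl hx)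
      · rcases k with _ | (_ | k')
        · omega
        · left; right
          rw [List.take_succ_cons, List.take_zero, pv_join_one] at hx
          exact hx
        · right
          refine ⟨k' + 1, by omega, by simp at hk2; omega, ?_⟩
          rw [List.take_succ_cons, pv_join_cons part _ (pv_take_ne_nil (k' + 1) rest (by omega) (by simp at hk2; omega))] at hx
          exact hx

theorem pv_nodup_add (s : PySem.Set String) (x : String) (h : List.Nodup s) :
    List.Nodup (PySem.Set.add s x) := by
  rw [PySem.Set.add]
  split_ifs with hc
  · exact h
  · have hx : x ∉ s := fun hmem => hc (List.contains_iff_mem.mpr hmem)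
    rw [List.nodup_append]
    refine ⟨h, List.nodup_singleton x, ?_⟩
    intro a ha b hb
    have hbx : b = x := by simpa using hb
    subst hbx
    intro hax
    exact hx (hax ▸ ha)

theorem pv_nodup_acc (parts : List String) (acc? : Option String) (dirs : PySem.Set String)
    (h : List.Nodup dirs) : List.Nodup (pvAccParts parts acc? dirs) := by
  induction parts generalizing acc? dirs with
  | nil => exact h
  | cons part rest ih => exact ih _ _ (pv_nodup_add _ _ h)

theorem pv_join_nil_str : PySem.Str.join "/" [] = "" := by
  rw [String.ext_iff, PySem.Str.toList_join]
  simp [PySem.Chars.join_nil]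

theorem pv_step (dA dB : List String) (path x : String)
    (hiff : x ∈ dA ↔ x ∈ dB) (hx1 : x ≠ "") (hx2 : x ≠ "/") :
    (x ∈ pvAWhile ((PySem.Str.split? path "/").getD []) (dA ++ [path]) ↔
      x ∈ pvAccParts ((PySem.Str.split? path "/").getD []) none dB) := by
  rw [pv_A1, pv_B1]
  have hjs := pv_join_split path
  set parts := (PySem.Str.split? path "/").getD [] with hparts
  constructor
  · rintro (hx | ⟨k, hk1, hk2, hx, _, _⟩)
    · rcases List.mem_append.mp hx with h1 | h2
      · exact Or.inl (hiff.mp h1)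
      · have hxp : x = path := by simpa using h2
        right
        have hn : 1 ≤ parts.length := by
          by_contra h0
          have hnil : parts = [] := List.eq_nil_of_length_eq_zero (by omega)
          apply hx1
          rw [hxp, ← hjs, hnil, pv_join_nil_str]
        exact ⟨parts.length, hn, le_refl _, by rw [hxp, ← hjs, List.take_length]⟩
    · exact Or.inr ⟨k, hk1, by omega, hx⟩
  · rintro (hx | ⟨k, hk1, hk2, hx⟩)
    · exact Or.inl (List.mem_append_left _ (hiff.mpr hx))
    · by_cases hk : k = parts.length
      · left
        apply List.mem_append_right
        have : x = path := by rw [hx, hk, List.take_length, hjs]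
        simp [this]
      · exact Or.inr ⟨k, hk1, by omega, hx, hx1, hx2⟩

theorem pv_M (paths : List String) (dA dB : List String)
    (hiff : ∀ x : String, x ≠ "" → x ≠ "/" → (x ∈ dA ↔ x ∈ dB)) :
    ∀ x : String, x ≠ "" → x ≠ "/" →
      (x ∈ paths.foldl (fun directories path =>
          pvAWhile ((PySem.Str.split? path "/").getD []) (directories ++ [path])) dA ↔
       x ∈ paths.foldl (fun dirs path =>
          pvAccParts ((PySem.Str.split? path "/").getD []) none dirs) dB) := by
  induction paths generalizing dA dB with
  | nil => exact hiff
  | cons path rest ih =>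
    simp only [List.foldl_cons]
    exact ih _ _ (fun x hx1 hx2 => pv_step dA dB path x (hiff x hx1 hx2) hx1 hx2)

theorem pv_nodup_fold (paths : List String) (dB : List String) (h : List.Nodup dB) :
    List.Nodup (paths.foldl (fun dirs path =>
      pvAccParts ((PySem.Str.split? path "/").getD []) none dirs) dB) := by
  induction paths generalizing dB with
  | nil => exact h
  | cons path rest ih =>
    simp only [List.foldl_cons]
    exact ih _ (pv_nodup_acc _ _ _ h)

-- ===== VERDICT (by name: the statement is the Claim_ definition above) =====
theorem get_all_directories_spec : Claim_equal_get_all_directories := by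
  intro paths _
  show get_all_directories paths = get_all_directories_alt paths
  simp only [get_all_directories, get_all_directories_alt]
  apply (PySem.List.sorted_id_eq_sorted_id_iff_perm _ _).mpr
  apply (List.perm_ext_iff_of_nodup
    (List.Nodup.filter _ (PySem.Set.nodup_ofList _))
    (List.Nodup.filter _ (pv_nodup_fold _ _ (PySem.Set.nodup_ofList [])))).mpr
  intro x
  rw [List.mem_filter, List.mem_filter]
  apply and_congr_left
  intro hp
  have hp' : x ≠ "/" ∧ x ≠ "" := by
    constructor <;> intro hx <;> simp [hx] at hp
  rw [PySem.Set.mem_ofList]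
  exact pv_M paths [] (PySem.Set.ofList []) (by intro y _ _; simp) x hp'.2 hp'.1
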